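-- pv_equiv track=rewrite | github.com/galreshaid/ARCP | apps/users/auth_backends.py | _escape_filter_value
-- ===== SOURCE A (Python) =====
-- def _escape_filter_value(value: str):
--     escaped = str(value or "")
--     replacements = {
--         "\\": r"\5c",
--         "*": r"\2a",
--         "(": r"\28",
--         ")": r"\29",
--         "\x00": r"\00",
--     }
--     for needle, replacement in replacements.items():
--         escaped = escaped.replace(needle, replacement)
--     return escaped
-- ===== SOURCE B (Python) =====
-- def _escape_filter_value(value: str):
--     escaped = str(value or "")
--     mapping = {
--         "\\": r"\5c",
--         "*": r"\2a",
--         "(": r"\28",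
--         ")": r"\29",
--         "\x00": r"\00",
--     }
--     return "".join(mapping.get(ch, ch) for ch in escaped)
-- ===== Notes on version B (the rewrite author's own statement) =====
-- stated objective: alternative
-- what changed: Replaces five sequential whole-string str.replace scans with a single per-character pass that maps each character through the replacement dict and joins the pieces.
import Mathlib
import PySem

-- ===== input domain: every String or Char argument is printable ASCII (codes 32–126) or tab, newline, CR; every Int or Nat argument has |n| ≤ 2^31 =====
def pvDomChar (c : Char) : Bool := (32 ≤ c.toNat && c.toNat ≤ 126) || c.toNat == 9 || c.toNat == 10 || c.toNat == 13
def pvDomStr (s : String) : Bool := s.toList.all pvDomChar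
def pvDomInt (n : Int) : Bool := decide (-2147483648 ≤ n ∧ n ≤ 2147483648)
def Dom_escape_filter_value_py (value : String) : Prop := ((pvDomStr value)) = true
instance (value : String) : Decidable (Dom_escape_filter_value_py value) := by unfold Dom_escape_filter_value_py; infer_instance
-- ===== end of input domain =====

-- B replaces A's five sequential whole-string replace scans by one pass that maps each
-- character through the replacement dict; return values proved equal on all inputs.

-- ===== PORT A =====
-- the replacement dict, iterated in insertion order (as in Python)
def pvReplacements : PySem.Dict String String :=
  PySem.Dict.ofList
    [("\\", "\\5c"), ("*", "\\2a"), ("(", "\\28"), (")", "\\29"), ("\x00", "\\00")]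

def escape_filter_value_py (value : String) : String :=
  let escaped := if value = "" then "" else value   -- str(value or "")
  (PySem.Dict.items pvReplacements).foldl
    (fun esc p => PySem.Str.replace esc p.1 p.2) escaped

-- ===== PORT B =====
def escape_filter_value_py_alt (value : String) : String :=
  let escaped := if value = "" then "" else value   -- str(value or "")
  PySem.Str.join ""
    (escaped.toList.map (fun ch =>
      (PySem.Dict.get? pvReplacements (String.singleton ch)).getD (String.singleton ch)))

-- ===== PRECONDITION & SPEC =====
def Spec_escape_filter_value_py (value : String) (out : String) : Prop := out = escape_filter_value_py_alt value
instance (value : String) (out : String) : Decidable (Spec_escape_filter_value_py value out) := by unfold Spec_escape_filter_value_py; infer_instance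

-- ===== CLAIM (what is proved, stated in full; the proofs are below) =====
def Claim_equal_escape_filter_value_py : Prop := ∀ (value : String), Dom_escape_filter_value_py value → Spec_escape_filter_value_py value (escape_filter_value_py value)

-- ===== LEMMAS AND PROOFS =====

-- the per-character escape both sides compute
def pvEsc (c : Char) : List Char :=
  if c = '\\' then ['\\', '5', 'c']
  else if c = '*' then ['\\', '2', 'a']
  else if c = '(' then ['\\', '2', '8']
  else if c = ')' then ['\\', '2', '9']
  else if c = '\x00' then ['\\', '0', '0']
  else [c]

theorem go_single (n : Char) (new : List Char) :
    ∀ (fuel : Nat) (l acc : List Char), l.length ≤ fuel →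
      PySem.Chars.replace.go [n] new fuel l acc =
        acc.reverse ++ l.flatMap (fun c => if c = n then new else [c]) := by
  intro fuel
  induction fuel with
  | zero =>
    intro l acc h
    have : l = [] := List.eq_nil_of_length_eq_zero (Nat.le_zero.mp h)
    subst this
    simp [PySem.Chars.replace.go]
  | succ fuel ih =>
    intro l acc h
    cases l with
    | nil => simp [PySem.Chars.replace.go]
    | cons c t =>
      by_cases hc : c = n
      · subst hc
        have hpre : List.isPrefixOf [c] (c :: t) = true := by
          simp [List.isPrefixOf]
        rw [PySem.Chars.replace.go, if_pos hpre]
        rw [ih _ _ (by simpa using Nat.le_of_succ_le_succ h)]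
        simp
      · have hpre : List.isPrefixOf [n] (c :: t) = false := by
          simp [List.isPrefixOf]
          exact fun hh => absurd hh.symm hc
        rw [PySem.Chars.replace.go, if_neg (by simp [hpre])]
        rw [ih _ _ (Nat.le_of_succ_le_succ h)]
        simp [hc]

theorem replace_single (s : List Char) (n : Char) (new : List Char) :
    PySem.Chars.replace s [n] new = s.flatMap (fun c => if c = n then new else [c]) := by
  rw [PySem.Chars.replace]
  simp [go_single n new s.length s [] (le_refl _)]

-- the composition of the five single-character substitutions, per character
theorem per_char_a (c : Char) :
    ((if c = '\\' then ['\\','5','c'] else [c]).flatMap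
      (fun x => (if x = '*' then ['\\','2','a'] else [x]).flatMap
        (fun x => (if x = '(' then ['\\','2','8'] else [x]).flatMap
          (fun x => (if x = ')' then ['\\','2','9'] else [x]).flatMap
            (fun d => if d = '\x00' then ['\\','0','0'] else [d]))))) = pvEsc c := by
  by_cases h1 : c = '\\'
  · subst h1; decide
  by_cases h2 : c = '*'
  · subst h2; decide
  by_cases h3 : c = '('
  · subst h3; decide
  by_cases h4 : c = ')'
  · subst h4; decide
  by_cases h5 : c = '\x00'
  · subst h5; decide
  simp [pvEsc, h1, h2, h3, h4, h5]

theorem a_flatMap (s : String) :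
    (escape_filter_value_py s).toList =
      (if s = "" then "" else s).toList.flatMap pvEsc := by
  unfold escape_filter_value_py
  have hitems : PySem.Dict.items pvReplacements =
      [("\\", "\\5c"), ("*", "\\2a"), ("(", "\\28"), (")", "\\29"), ("\x00", "\\00")] := rfl
  rw [hitems]
  simp only [List.foldl]
  rw [PySem.Str.toList_replace, PySem.Str.toList_replace, PySem.Str.toList_replace,
      PySem.Str.toList_replace, PySem.Str.toList_replace]
  show PySem.Chars.replace (PySem.Chars.replace (PySem.Chars.replace (PySem.Chars.replace
        (PySem.Chars.replace _ ['\\'] ['\\','5','c']) ['*'] ['\\','2','a'])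
        ['('] ['\\','2','8']) [')'] ['\\','2','9']) ['\x00'] ['\\','0','0'] = _
  rw [replace_single, replace_single, replace_single, replace_single, replace_single]
  rw [List.flatMap_assoc, List.flatMap_assoc, List.flatMap_assoc, List.flatMap_assoc]
  exact List.flatMap_congr (fun c _ => per_char_a c)

theorem singleton_ne_of_ne {c k : Char} (h : c ≠ k) : String.singleton k ≠ String.singleton c := by
  intro hh
  exact h (by have := congrArg String.toList hh; simpa using this.symm)

theorem key_beq_false {c k : Char} (h : c ≠ k) (s : String) (hs : s = String.singleton k) :
    (s == String.singleton c) = false := by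
  subst hs; rw [beq_eq_false_iff_ne]; exact singleton_ne_of_ne h

theorem per_char_b (c : Char) :
    ((PySem.Dict.get? pvReplacements (String.singleton c)).getD (String.singleton c)).toList
      = pvEsc c := by
  by_cases h1 : c = '\\'
  · subst h1; decide
  by_cases h2 : c = '*'
  · subst h2; decide
  by_cases h3 : c = '('
  · subst h3; decide
  by_cases h4 : c = ')'
  · subst h4; decide
  by_cases h5 : c = '\x00'
  · subst h5; decide
  have hget : PySem.Dict.get? pvReplacements (String.singleton c) = none := by
    have hit : PySem.Dict.items pvReplacements =
        [("\\", "\\5c"), ("*", "\\2a"), ("(", "\\28"), (")", "\\29"), ("\x00", "\\00")] := rfl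
    rw [PySem.Dict.get?, hit]
    simp [List.find?, key_beq_false h1 "\\" (by decide), key_beq_false h2 "*" (by decide),
      key_beq_false h3 "(" (by decide), key_beq_false h4 ")" (by decide),
      key_beq_false h5 "\x00" (by decide)]
  simp [hget, pvEsc, h1, h2, h3, h4, h5]

theorem flatten_intersperse_nil (l : List (List Char)) :
    (l.intersperse []).flatten = l.flatten := by
  induction l with
  | nil => simp
  | cons a t ih =>
    cases t with
    | nil => simp
    | cons b u => simp only [List.intersperse] at *; simp [ih]

theorem b_flatMap (s : String) :
    (escape_filter_value_py_alt s).toList =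
      (if s = "" then "" else s).toList.flatMap pvEsc := by
  unfold escape_filter_value_py_alt
  rw [PySem.Str.toList_join]
  simp only [PySem.Chars.join, List.intercalate]
  rw [show ("" : String).toList = ([] : List Char) from rfl]
  rw [flatten_intersperse_nil]
  rw [List.map_map, ← List.flatMap_def]
  exact List.flatMap_congr (fun c _ => per_char_b c)

-- ===== VERDICT (by name: the statement is the Claim_ definition above) =====
theorem escape_filter_value_py_spec : Claim_equal_escape_filter_value_py := by
  intro value _
  unfold Spec_escape_filter_value_py
  apply String.toList_inj.mp
  rw [a_flatMap, b_flatMap]
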